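-- pv_equiv track=rewrite | github.com/micahcochran/request_builder_py | request_builder/request_builder2.py | _parse_request_with_variables_txtfile
-- ===== SOURCE A (Python) =====
-- def _parse_request_with_variables_txtfile(fh):
--     variable_mode = False
--     variables = {}
--     request_text = ''
--
--     for line in fh:
--         if line.startswith('---'):
--
--             # the --- sequence toggles variable_mode on/off
--             if variable_mode:
--                 variable_mode = False
--             else:
--                 variable_mode = True
--             continue
--
--         if variable_mode is True:
--             # variable_text_list.append(para.text)
--             name, value = line.split(':')
--             # TODO Could use some robustness for handling empty lines, or throwing out text that doesn't have a variable pair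
--             # always lower case the variables name
--             variables[name.strip().lower()] = value.strip()
--         else:
--             request_text += line
--
--     return request_text, variables
-- ===== SOURCE B (Python) =====
-- def _parse_request_with_variables_txtfile(fh):
--     # phase 1: partition the lines into sections delimited by '---' lines
--     sections = [[]]
--     for line in fh:
--         if line.startswith('---'):
--             sections.append([])
--         else:
--             sections[-1].append(line)
--     # phase 2: even-indexed sections are request text, odd-indexed ones are variable blocks
--     variables = {}
--     request_text = ''
--     for i, sec in enumerate(sections):
--         if i % 2 == 0:
--             request_text += ''.join(sec)
--         else:
--             for line in sec:
--                 name, value = line.split(':')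
--                 variables[name.strip().lower()] = value.strip()
--     return request_text, variables
-- ===== Notes on version B (the rewrite author's own statement) =====
-- stated objective: alternative
-- what changed: Replaces A's per-line variable_mode toggle with a two-phase decomposition: first partition the lines into sections at '---' boundary lines, then treat even-indexed sections as request text (joined) and odd-indexed sections as variable blocks.
import Mathlib
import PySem

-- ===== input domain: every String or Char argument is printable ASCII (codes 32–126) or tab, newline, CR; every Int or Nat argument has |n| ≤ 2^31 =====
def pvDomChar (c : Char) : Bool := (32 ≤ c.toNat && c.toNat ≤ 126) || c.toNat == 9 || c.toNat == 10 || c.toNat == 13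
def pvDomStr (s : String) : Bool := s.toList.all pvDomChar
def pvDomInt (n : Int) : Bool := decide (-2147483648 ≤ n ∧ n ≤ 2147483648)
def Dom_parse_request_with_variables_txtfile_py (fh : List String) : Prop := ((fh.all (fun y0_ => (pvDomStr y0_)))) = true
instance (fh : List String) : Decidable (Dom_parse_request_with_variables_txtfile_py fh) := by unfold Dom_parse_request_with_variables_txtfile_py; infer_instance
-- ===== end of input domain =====

-- B replaces A's per-line variable_mode toggle with a two-phase decomposition
-- (partition into '---'-delimited sections, then even sections = request text,
-- odd sections = variable blocks); equivalence is about the return value only.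

-- shared helper: 'name, value = line.split(':'); variables[name.strip().lower()] = value.strip()'
-- (the fallback branch is unreachable under Pre_, where line.split(':') has exactly two parts)
def pvProcVar (vars : PySem.Dict String String) (line : String) : PySem.Dict String String :=
  match PySem.Str.split? line ":" with
  | some [n, v] => vars.insert (PySem.Str.lower (PySem.Str.strip n)) (PySem.Str.strip v)
  | _ => vars

-- ===== PORT A =====
def pvALoop (fh : List String) (variable_mode : Bool) (vars : PySem.Dict String String)
    (request_text : String) : String × (List (String × String)) :=
  match fh with
  | [] => (request_text, vars.items)
  | line :: rest =>
    if PySem.Str.startswith line "---" then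
      pvALoop rest (if variable_mode then false else true) vars request_text
    else if variable_mode then
      pvALoop rest variable_mode (pvProcVar vars line) request_text
    else
      pvALoop rest variable_mode vars (request_text ++ line)

def parse_request_with_variables_txtfile_py (fh : List String) : String × (List (String × String)) :=
  pvALoop fh false PySem.Dict.empty ""

-- ===== PORT B =====
-- phase 1 loop body: 'sections.append([])' on a boundary, else 'sections[-1].append(line)'
def pvStep (sections : List (List String)) (line : String) : List (List String) :=
  if PySem.Str.startswith line "---" then sections ++ [[]]
  else sections.dropLast ++ [sections.getLastD [] ++ [line]]

-- phase 2: the enumerate loop over sections, carrying the index parity (even ↔ i % 2 == 0)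
def pvBLoop (secs : List (List String)) (even : Bool) (vars : PySem.Dict String String)
    (request_text : String) : String × (List (String × String)) :=
  match secs with
  | [] => (request_text, vars.items)
  | sec :: rest =>
    if even then
      pvBLoop rest false vars (request_text ++ PySem.Str.join "" sec)
    else
      pvBLoop rest true (sec.foldl pvProcVar vars) request_text

def parse_request_with_variables_txtfile_py_alt (fh : List String) : String × (List (String × String)) :=
  pvBLoop (fh.foldl pvStep [[]]) true PySem.Dict.empty ""

-- ===== PRECONDITION & SPEC =====
-- Pre_ excludes exactly the inputs where A raises ValueError: a line in variable mode
-- (an odd number of preceding '---' lines) whose split(':') does not have exactly two parts.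
def Pre_parse_request_with_variables_txtfile_py (fh : List String) : Prop :=
  ∀ i : Nat, (h : i < fh.length) → ¬ PySem.Str.startswith fh[i] "---" = true →
    ((fh.take i).countP (fun l => PySem.Str.startswith l "---")) % 2 = 1 →
    PySem.Str.count fh[i] ":" = 1
instance (fh : List String) : Decidable (Pre_parse_request_with_variables_txtfile_py fh) := by
  unfold Pre_parse_request_with_variables_txtfile_py; infer_instance
def pvWitness_parse_request_with_variables_txtfile_py : List String :=
  ["GET /x\n", "---\n", "A : 1\n", "---\n", "rest\n"]
def Spec_parse_request_with_variables_txtfile_py (fh : List String) (out : String × (List (String × String))) : Prop := out = parse_request_with_variables_txtfile_py_alt fh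
instance (fh : List String) (out : String × (List (String × String))) : Decidable (Spec_parse_request_with_variables_txtfile_py fh out) := by unfold Spec_parse_request_with_variables_txtfile_py; infer_instance

-- ===== CLAIM (what is proved, stated in full; the proofs are below) =====
def Claim_equal_parse_request_with_variables_txtfile_py : Prop := ∀ (fh : List String), Dom_parse_request_with_variables_txtfile_py fh → Pre_parse_request_with_variables_txtfile_py fh → Spec_parse_request_with_variables_txtfile_py fh (parse_request_with_variables_txtfile_py fh)

-- ===== LEMMAS AND PROOFS =====

-- proof-only helper: the sections of fh, defined by structural recursion
def pvSplitSections : List String → List (List String)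
  | [] => [[]]
  | l :: rest =>
    let secs := pvSplitSections rest
    if PySem.Str.startswith l "---" then [] :: secs
    else (l :: secs.headD []) :: secs.tail

theorem pvSplitSections_ne_nil (fh : List String) : pvSplitSections fh ≠ [] := by
  cases fh with
  | nil => simp [pvSplitSections]
  | cons l rest => simp only [pvSplitSections]; split <;> simp

theorem pvDropLast_getLastD (secs : List (List String)) (hne : secs ≠ []) :
    secs.dropLast ++ [secs.getLastD []] = secs := by
  rw [List.getLastD_eq_getLast?, List.getLast?_eq_some_getLast hne, Option.getD_some,
    List.dropLast_concat_getLast hne]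

theorem pvFoldl_step_eq (lines : List String) (secs : List (List String)) (hne : secs ≠ []) :
    lines.foldl pvStep secs =
      secs.dropLast ++ ((secs.getLastD [] ++ (pvSplitSections lines).headD []) ::
        (pvSplitSections lines).tail) := by
  induction lines generalizing secs with
  | nil =>
    simp only [List.foldl_nil, pvSplitSections, List.headD, List.tail, List.append_nil]
    exact (pvDropLast_getLastD secs hne).symm
  | cons l rest ih =>
    obtain ⟨h, t, hs⟩ : ∃ h t, pvSplitSections rest = h :: t := by
      cases hst : pvSplitSections rest with
      | nil => exact absurd hst (pvSplitSections_ne_nil rest)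
      | cons h t => exact ⟨h, t, rfl⟩
    simp only [List.foldl_cons, pvStep, pvSplitSections]
    by_cases hb : PySem.Str.startswith l "---" = true
    · rw [if_pos hb, ih (secs ++ [[]]) (by simp), if_pos hb]
      simp only [hs, List.dropLast_concat, List.getLastD_concat, List.headD_cons, List.tail_cons,
        List.nil_append, List.append_nil]
      rw [List.append_cons _ (secs.getLastD []), pvDropLast_getLastD secs hne]
    · rw [if_neg hb, ih _ (by simp), if_neg hb]
      simp [hs]

theorem pvFoldl_eq_splitSections (lines : List String) :
    lines.foldl pvStep [[]] = pvSplitSections lines := by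
  rw [pvFoldl_step_eq lines [[]] (by simp)]
  cases hst : pvSplitSections lines with
  | nil => exact absurd hst (pvSplitSections_ne_nil lines)
  | cons h t => simp


theorem pvJoin_cons (l : String) (h : List String) :
    PySem.Str.join "" (l :: h) = l ++ PySem.Str.join "" h := by
  simp only [PySem.Str.join, PySem.Chars.join]
  cases h <;> simp [List.intercalate, String.ofList_append]

theorem pvJoin_nil : PySem.Str.join "" ([] : List String) = "" := by
  simp [PySem.Str.join, PySem.Chars.join, List.intercalate]

-- the core invariant: A's toggle loop equals B's section loop, parity even = !variable_mode
theorem pvLoop_eq (fh : List String) (mode : Bool) (vars : PySem.Dict String String)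
    (text : String) :
    pvALoop fh mode vars text = pvBLoop (pvSplitSections fh) (!mode) vars text := by
  induction fh generalizing mode vars text with
  | nil =>
    cases mode <;> simp [pvALoop, pvSplitSections, pvBLoop, PySem.Str.join]
  | cons l rest ih =>
    obtain ⟨h, t, hs⟩ : ∃ h t, pvSplitSections rest = h :: t := by
      cases hst : pvSplitSections rest with
      | nil => exact absurd hst (pvSplitSections_ne_nil rest)
      | cons h t => exact ⟨h, t, rfl⟩
    by_cases hb : PySem.Chars.startswith l.toList ['-', '-', '-'] = true <;> cases mode <;>
      simp [pvALoop, pvSplitSections, hb, hs, ih, pvBLoop, pvJoin_cons, pvJoin_nil,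
        String.append_assoc, String.append_empty, List.foldl]

-- ===== VERDICT (by name: the statement is the Claim_ definition above) =====
theorem parse_request_with_variables_txtfile_py_spec : Claim_equal_parse_request_with_variables_txtfile_py := by
  intro fh _ _
  unfold Spec_parse_request_with_variables_txtfile_py
  unfold parse_request_with_variables_txtfile_py parse_request_with_variables_txtfile_py_alt
  rw [pvFoldl_eq_splitSections, pvLoop_eq]; rfl
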